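-- pv_equiv track=rewrite | github.com/MichaelFitzurka/comictagger | scripts/csv_inventory.py | extract_page_type_counts
-- ===== SOURCE A (Python) =====
-- def extract_page_type_counts(pages: list[dict[str, str]]) -> dict[str, int]:
--     page_type_counts: dict[str, int] = {}
--
--     for page in pages:
--         page_type: str = "Story"
--         if "@Type" in page:
--             page_type = page["@Type"]
--         if page_type in page_type_counts:
--             page_type_counts[page_type] += 1
--         else:
--             page_type_counts[page_type] = 1
--
--     return page_type_counts
-- ===== SOURCE B (Python) =====
-- def extract_page_type_counts(pages: list[dict[str, str]]) -> dict[str, int]: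
--     keys = [page.get("@Type", "Story") for page in pages]
--     return {k: keys.count(k) for k in dict.fromkeys(keys)}
-- ===== Notes on version B (the rewrite author's own statement) =====
-- stated objective: simpler
-- what changed: Replaces the single-pass running hash-table counter with a two-phase comprehension: project the type keys once, then for each distinct key (dict.fromkeys order = first occurrence) count its occurrences with list.count.
import Mathlib
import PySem

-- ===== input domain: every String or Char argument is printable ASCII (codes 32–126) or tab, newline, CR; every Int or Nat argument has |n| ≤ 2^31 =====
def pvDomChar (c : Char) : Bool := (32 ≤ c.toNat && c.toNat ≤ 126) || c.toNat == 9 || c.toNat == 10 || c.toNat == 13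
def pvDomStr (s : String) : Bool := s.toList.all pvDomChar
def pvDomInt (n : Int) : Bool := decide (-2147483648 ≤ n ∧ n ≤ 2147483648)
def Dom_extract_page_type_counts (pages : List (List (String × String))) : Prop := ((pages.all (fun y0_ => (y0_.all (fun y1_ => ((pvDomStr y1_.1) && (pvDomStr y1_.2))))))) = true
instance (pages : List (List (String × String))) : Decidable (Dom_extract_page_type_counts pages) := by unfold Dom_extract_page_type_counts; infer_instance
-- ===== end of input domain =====

-- B replaces A's single-pass running counter dict with a two-phase form: project the type keys, then count each distinct key (same cost, simpler shape).


-- ===== PORT A =====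
-- Port of A: single pass maintaining a running count dict.
def extract_page_type_counts (pages : List (List (String × String))) : List (String × Int) :=
  (pages.foldl
    (fun (d : PySem.Dict String Int) page =>
      let pt : String :=
        if (PySem.Dict.mk page).contains "@Type" then
          (PySem.Dict.mk page).getD "@Type" "Story"   -- page["@Type"], guarded by the contains check
        else "Story"
      if d.contains pt then d.insert pt (d.getD pt 0 + 1) else d.insert pt 1)
    PySem.Dict.empty).items

-- ===== PORT B =====
-- Port of B: project the type keys, then count per distinct key (dict.fromkeys order).
def extract_page_type_counts_alt (pages : List (List (String × String))) : List (String × Int) :=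
  let keys := pages.map (fun page => (PySem.Dict.mk page).getD "@Type" "Story")
  (PySem.List.dedup keys).map (fun k => (k, (keys.count k : Int)))

-- ===== PRECONDITION & SPEC =====
def Spec_extract_page_type_counts (pages : List (List (String × String))) (out : List (String × Int)) : Prop := out = extract_page_type_counts_alt pages
instance (pages : List (List (String × String))) (out : List (String × Int)) : Decidable (Spec_extract_page_type_counts pages out) := by unfold Spec_extract_page_type_counts; infer_instance

-- ===== CLAIM (what is proved, stated in full; the proofs are below) =====
def Claim_equal_extract_page_type_counts : Prop := ∀ (pages : List (List (String × String))), Dom_extract_page_type_counts pages → Spec_extract_page_type_counts pages (extract_page_type_counts pages)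

-- ===== LEMMAS AND PROOFS =====

-- A's loop over pages is Counter(keys) for the projected key list.
theorem pages_fold_eq_counter (pages : List (List (String × String))) :
    pages.foldl
      (fun (d : PySem.Dict String Int) page =>
        let pt : String :=
          if (PySem.Dict.mk page).contains "@Type" then
            (PySem.Dict.mk page).getD "@Type" "Story"
          else "Story"
        if d.contains pt then d.insert pt (d.getD pt 0 + 1) else d.insert pt 1)
      PySem.Dict.empty
    = PySem.Dict.counter (pages.map (fun page => (PySem.Dict.mk page).getD "@Type" "Story")) := by
  rw [← PySem.Dict.foldl_insert_getD_add_one_eq_counter, List.foldl_map]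
  apply PySem.List.foldl_congr_mem
  intro d page _
  by_cases hc : (PySem.Dict.mk page).contains "@Type"
  · simp only [hc, if_true]
    by_cases hd : d.contains ((PySem.Dict.mk page).getD "@Type" "Story")
    · simp [hd]
    · simp only [Bool.not_eq_true] at hd
      simp [hd, PySem.Dict.getD_of_not_contains _ _ hd]
  · simp only [Bool.not_eq_true] at hc
    rw [PySem.Dict.getD_of_not_contains _ _ hc]
    simp only [hc]
    by_cases hd : d.contains "Story"
    · simp [hd]
    · simp only [Bool.not_eq_true] at hd
      simp [hd, PySem.Dict.getD_of_not_contains _ _ hd]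

-- ===== VERDICT (by name: the statement is the Claim_ definition above) =====
theorem extract_page_type_counts_spec : Claim_equal_extract_page_type_counts := by
  intro pages _
  show extract_page_type_counts pages = extract_page_type_counts_alt pages
  unfold extract_page_type_counts extract_page_type_counts_alt
  rw [pages_fold_eq_counter]
  simp [PySem.Dict.items_counter, PySem.List.dedup_eq_ofList]
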